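-- pv_equiv track=rewrite | github.com/Darshna-Choudhary/Dsa_practice_cpu | Strings/Q55_print_all_subsequnces_of_str.py | getPermute
-- ===== SOURCE A (Python) =====
-- def getPermute(s):
--     n = len(s)
--     ans = []
--     for i in range(2 ** n):
--         bn = bin(i)[2:]
--
--         if (n-len(bn)) >= 0:
--             bn = '0' * (n-len(bn)) + bn
--             temp = []
--             for k in range(n):
--                 if bn[k] == '1':
--                     temp.append(s[k])
--             ans.append(temp)
--     return ans
-- ===== SOURCE B (Python) =====
-- def getPermute(s):
--     # Include/exclude recursion: at each position first take every subsequence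
--     # without the current char, then every one with it.  For the empty string this
--     # naturally yields [[]] (the one empty subsequence), where A returns [].
--     def go(chars, acc):
--         if not chars:
--             return [acc]
--         rest = chars[1:]
--         return go(rest, acc) + go(rest, acc + [chars[0]])
--     return go(list(s), [])
-- ===== Notes on version B (the rewrite author's own statement) =====
-- stated objective: alternative
-- what changed: Replaces the bitmask enumeration (formatting each i in 0..2^n as a zero-padded binary string and scanning it per index) with a direct include/exclude recursion over the characters that concatenates the exclude-branch results before the include-branch results; same exponential output size, no per-mask string formatting.
-- intended difference: On the empty string A's guard (n - len(bin(0)[2:]) >= 0 fails for n=0) makes it return [] while B returns [[]], the single empty subsequence, which is the intended enumeration of all subsequences of ''. — e.g. on getPermute(""): A returns [], B returns [[]]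
import Mathlib
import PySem

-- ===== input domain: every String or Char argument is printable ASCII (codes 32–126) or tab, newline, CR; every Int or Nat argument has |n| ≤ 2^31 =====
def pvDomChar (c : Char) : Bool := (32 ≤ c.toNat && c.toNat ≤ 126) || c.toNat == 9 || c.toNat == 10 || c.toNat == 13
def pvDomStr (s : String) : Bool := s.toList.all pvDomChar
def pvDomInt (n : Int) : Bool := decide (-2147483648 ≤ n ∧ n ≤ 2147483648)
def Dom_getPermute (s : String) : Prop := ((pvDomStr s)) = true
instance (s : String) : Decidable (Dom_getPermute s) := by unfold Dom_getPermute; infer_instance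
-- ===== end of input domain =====

-- B replaces A's bitmask enumeration (binary-string formatting per index) by an
-- include/exclude recursion over the characters; on the empty string A returns []
-- (its padding guard fails for n = 0) while B returns [[]], the intended single
-- empty subsequence — stated below as the intended difference D_getPermute.

-- ===== PORT A =====
def getPermute (s : String) : List (List String) :=
  let cs := s.toList
  let n := cs.length                                         -- n = len(s)
  (PySem.List.pyRange 0 ((2:Int) ^ n) 1).foldl (fun ans i =>  -- for i in range(2 ** n)
    -- bn = bin(i)[2:]
    let bn := PySem.List.slice (PySem.Int.toBinChars0b i) (some 2) none
    if (n : Int) - (bn.length : Int) ≥ 0 then                 -- if (n-len(bn)) >= 0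
      -- bn = '0' * (n-len(bn)) + bn
      let bn2 := PySem.List.pyRepeat ['0'] ((n : Int) - (bn.length : Int)) ++ bn
      -- for k in range(n): if bn[k] == '1': temp.append(s[k])
      -- (indices k are provably in range of both bn2 and cs, so pyGetD is exact here)
      let temp := (PySem.List.pyRange 0 (n : Int) 1).foldl (fun temp k =>
        if PySem.List.pyGetD bn2 k ' ' = '1' then
          temp ++ [String.ofList [PySem.List.pyGetD cs k ' ']]
        else temp) ([] : List String)
      ans ++ [temp]                                           -- ans.append(temp)
    else ans) []

-- ===== PORT B =====
-- go(chars, acc): subsequences of chars appended to acc, exclude-branch first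
def altGo : List Char → List String → List (List String)
  | [], acc => [acc]
  | c :: rest, acc => altGo rest acc ++ altGo rest (acc ++ [String.ofList [c]])

def getPermute_alt (s : String) : List (List String) := altGo s.toList []

-- ===== PRECONDITION & SPEC =====
-- On the empty string A returns [] (its guard n-len(bn) >= 0 fails for n = 0) while
-- B returns [[]]; the one empty subsequence is the intended enumeration for "".
def D_getPermute (s : String) : Prop := s = ""
instance (s : String) : Decidable (D_getPermute s) := by unfold D_getPermute; infer_instance

def Spec_getPermute (s : String) (out : List (List String)) : Prop :=
  ¬ D_getPermute s → out = getPermute_alt s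
instance (s : String) (out : List (List String)) : Decidable (Spec_getPermute s out) := by
  unfold Spec_getPermute; infer_instance

def pvDiffWitness_getPermute : String := ""
def pvDiffWitnessOut_getPermute : (List (List String)) × (List (List String)) := ([], [[]])

-- ===== CLAIM (what is proved, stated in full; the proofs are below) =====
def Claim_unchanged_getPermute : Prop := ∀ (s : String), Dom_getPermute s → Spec_getPermute s (getPermute s)
def Claim_changed_getPermute : Prop := Dom_getPermute (pvDiffWitness_getPermute) ∧ D_getPermute (pvDiffWitness_getPermute) ∧ getPermute (pvDiffWitness_getPermute) = pvDiffWitnessOut_getPermute.1 ∧ getPermute_alt (pvDiffWitness_getPermute) = pvDiffWitnessOut_getPermute.2 ∧ pvDiffWitnessOut_getPermute.1 ≠ pvDiffWitnessOut_getPermute.2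
def Claim_exact_getPermute : Prop := ∀ (s : String), Dom_getPermute s → D_getPermute s → getPermute s ≠ getPermute_alt s

-- ===== LEMMAS AND PROOFS =====

-- binary digits of k, as A's bin(k)[2:] produces them
def binD (k : Nat) : List Char := Nat.toDigits 2 k
-- A's zero-padded mask for index k at width n
def padM (n k : Nat) : List Char := List.replicate (n - (binD k).length) '0' ++ binD k
-- A's inner loop as a zip-filter-map
def rowM (cs bn : List Char) : List String :=
  ((cs.zip bn).filter (fun cb => decide (cb.2 = '1'))).map (fun cb => String.ofList [cb.1])

theorem tdc_acc (f : Nat) : ∀ (n : Nat) (ds : List Char),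
    Nat.toDigitsCore 2 f n ds = Nat.toDigitsCore 2 f n [] ++ ds := by
  induction f with
  | zero => intro n ds; simp [Nat.toDigitsCore]
  | succ f ih =>
    intro n ds
    simp only [Nat.toDigitsCore]
    by_cases h : n / 2 = 0
    · simp [h]
    · simp only [h, if_false]
      rw [ih (n/2) (Nat.digitChar (n % 2) :: ds), ih (n/2) [Nat.digitChar (n % 2)]]
      simp

theorem tdc_fuel (f : Nat) : ∀ (g n : Nat), n < f → n < g →
    Nat.toDigitsCore 2 f n [] = Nat.toDigitsCore 2 g n [] := by
  induction f with
  | zero => omega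
  | succ f ih =>
    intro g n hf hg
    obtain ⟨g', rfl⟩ : ∃ g', g = g' + 1 := ⟨g - 1, by omega⟩
    simp only [Nat.toDigitsCore]
    by_cases h : n / 2 = 0
    · simp [h]
    · simp only [h, if_false]
      rw [tdc_acc, tdc_acc g', ih g' (n/2) (by omega) (by omega)]

theorem binD_halve (k : Nat) (h : 2 ≤ k) :
    binD k = binD (k / 2) ++ [Nat.digitChar (k % 2)] := by
  show Nat.toDigitsCore 2 (k+1) k [] = _
  rw [Nat.toDigitsCore]
  have h2 : ¬ (k / 2 = 0) := by omega
  simp only [h2, if_false]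
  rw [tdc_acc, tdc_fuel k (k/2+1) (k/2) (by omega) (by omega)]
  rfl

theorem binD_len_le (m k : Nat) (hm : 1 ≤ m) (hk : k < 2 ^ m) : (binD k).length ≤ m :=
  Nat.toDigits_length 2 k m hm hk

theorem padM_halve (m j : Nat) (hm : 1 ≤ m) (hj : j < 2 ^ (m + 1)) :
    padM (m + 1) j = padM m (j / 2) ++ [Nat.digitChar (j % 2)] := by
  obtain ⟨m', rfl⟩ : ∃ m', m = m' + 1 := ⟨m - 1, by omega⟩
  rcases Nat.lt_or_ge j 2 with hj2 | hj2
  · interval_cases j <;>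
      · simp [padM, show binD 0 = ['0'] from rfl, show binD 1 = ['1'] from rfl,
          List.replicate_succ' (n := m')]
        try decide
  · rw [padM, padM, binD_halve j hj2]
    have hlen : (binD (j/2)).length + 1 ≤ m' + 1 + 1 → True := fun _ => trivial
    simp only [List.length_append, List.length_singleton]
    rw [show m' + 1 + 1 - ((binD (j/2)).length + 1) = m' + 1 - (binD (j/2)).length by omega]
    simp [List.append_assoc]

theorem binD_high (m : Nat) (hm : 1 ≤ m) : ∀ j : Nat, j < 2 ^ m →
    binD (2 ^ m + j) = '1' :: padM m j := by
  induction m with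
  | zero => omega
  | succ m ih =>
    intro j hj
    rcases Nat.eq_or_lt_of_le hm with hm1 | hm2
    · -- m + 1 = 1
      have hm0 : m = 0 := by omega
      subst hm0
      interval_cases j <;> decide
    · have hm' : 1 ≤ m := by omega
      have h2 : 2 ≤ 2 ^ (m + 1) + j := by
        have : 2 ≤ 2 ^ (m + 1) := by
          calc 2 = 2 ^ 1 := rfl
          _ ≤ 2 ^ (m+1) := Nat.pow_le_pow_right (by omega) (by omega)
        omega
      rw [binD_halve _ h2]
      have hdiv : (2 ^ (m + 1) + j) / 2 = 2 ^ m + j / 2 := by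
        have hp : 2 ^ (m+1) = 2 * 2 ^ m := by ring
        omega
      have hmod : (2 ^ (m + 1) + j) % 2 = j % 2 := by
        have hp : 2 ^ (m+1) = 2 * 2 ^ m := by ring
        omega
      rw [hdiv, hmod, ih hm' (j / 2) (by omega)]
      rw [padM_halve m j hm' hj]
      rfl

theorem padM_length (m j : Nat) (hm : 1 ≤ m) (hj : j < 2 ^ m) : (padM m j).length = m := by
  have h := binD_len_le m j hm hj
  simp [padM]
  omega

theorem padM_zero_bit (m i : Nat) (hm : 1 ≤ m) (hi : i < 2 ^ m) :
    padM (m + 1) i = '0' :: padM m i := by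
  have h := binD_len_le m i hm hi
  rw [padM, padM, show m + 1 - (binD i).length = (m - (binD i).length) + 1 by omega,
    List.replicate_succ]
  rfl

theorem padM_one_bit (m j : Nat) (hm : 1 ≤ m) (hj : j < 2 ^ m) :
    padM (m + 1) (2 ^ m + j) = '1' :: padM m j := by
  have hhigh := binD_high m hm j hj
  have hlen : (binD (2 ^ m + j)).length = m + 1 := by
    rw [hhigh]; simp [padM_length m j hm hj]
  rw [padM, hlen]
  simp [hhigh]

theorem rowM_cons_zero (c : Char) (cs bs : List Char) :
    rowM (c :: cs) ('0' :: bs) = rowM cs bs := by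
  simp [rowM]

theorem rowM_cons_one (c : Char) (cs bs : List Char) :
    rowM (c :: cs) ('1' :: bs) = String.ofList [c] :: rowM cs bs := by
  simp [rowM]

theorem altGo_eq_map (cs : List Char) : ∀ (acc : List String),
    altGo cs acc = (List.range (2 ^ cs.length)).map (fun k => acc ++ rowM cs (padM cs.length k)) := by
  induction cs with
  | nil => intro acc; simp [altGo, rowM]
  | cons c rest ih =>
    intro acc
    rcases rest with _ | ⟨d, rest'⟩
    · -- singleton string: compute both sides directly
      have h0 : padM 1 0 = ['0'] := rfl
      have h1 : padM 1 1 = ['1'] := rfl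
      simp [altGo, List.range_succ, h0, h1, rowM]
    · have hm : 1 ≤ (d :: rest').length := by simp
      have hsplit : (2:Nat) ^ ((d :: rest').length + 1)
          = 2 ^ (d :: rest').length + 2 ^ (d :: rest').length := by ring
      show altGo (c :: d :: rest') acc = _
      rw [altGo, ih acc, ih (acc ++ [String.ofList [c]]),
        show (c :: d :: rest').length = (d :: rest').length + 1 from rfl,
        hsplit, List.range_add, List.map_append, List.map_map]
      congr 1
      · apply List.map_congr_left
        intro i hi
        rw [padM_zero_bit _ i hm (List.mem_range.mp hi), rowM_cons_zero]
      · apply List.map_congr_left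
        intro j hj
        simp only [Function.comp]
        rw [padM_one_bit _ j hm (List.mem_range.mp hj), rowM_cons_one]
        simp

theorem innerFold_eq_rowM (cs bn : List Char) (n : Nat) (hcs : cs.length = n)
    (hbn : bn.length = n) :
    (PySem.List.pyRange 0 (n:Int) 1).foldl (fun temp k =>
        if PySem.List.pyGetD bn k ' ' = '1' then
          temp ++ [String.ofList [PySem.List.pyGetD cs k ' ']]
        else temp) ([] : List String) = rowM cs bn := by
  have hzlen : (cs.zip bn).length = n := by simp [hcs, hbn]
  rw [PySem.List.foldl_congr_mem _ _
      (fun temp k =>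
        if (PySem.List.pyGetD (cs.zip bn) k (' ', ' ')).2 = '1' then
          temp ++ [String.ofList [(PySem.List.pyGetD (cs.zip bn) k (' ', ' ')).1]] else temp) _ ?_]
  · rw [show (n : Int) = ((cs.zip bn).length : Int) by rw [hzlen]]
    rw [PySem.List.foldl_pyRange_zero_pyGetD' (cs.zip bn) (' ', ' ')
      (fun (t : List String) (p : Char × Char) =>
        if p.2 = '1' then t ++ [String.ofList [p.1]] else t) []]
    rw [PySem.List.foldl_append_ite (p := fun (p : Char × Char) => p.2 = '1')
      (f := fun (p : Char × Char) => String.ofList [p.1])]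
    simp [rowM]
  · intro acc x hx
    obtain ⟨hx0, hx1⟩ := PySem.List.mem_pyRange_one.mp hx
    beta_reduce
    rw [PySem.List.pyGetD_eq_getElem cs ' ' hx0 (by omega),
      PySem.List.pyGetD_eq_getElem bn ' ' hx0 (by omega),
      PySem.List.pyGetD_eq_getElem (cs.zip bn) (' ', ' ') hx0 (by rw [hzlen]; omega),
      List.getElem_zip]

theorem getPermute_eq_alt (s : String) (hne : s.toList ≠ []) :
    getPermute s = getPermute_alt s := by
  unfold getPermute getPermute_alt
  set cs := s.toList with hcs
  set n := cs.length with hn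
  have hn1 : 1 ≤ n := by rw [hn]; exact List.length_pos_of_ne_nil hne
  have hpow : ((2:Int) ^ n) = ((2 ^ n : Nat) : Int) := by push_cast; ring
  rw [PySem.List.foldl_congr_mem _ _
      (fun ans i => ans ++ [rowM cs (padM n i.toNat)]) _ ?_]
  · rw [PySem.List.foldl_append_singleton_eq_map, altGo_eq_map cs [],
      PySem.List.pyRange_one 0 ((2:Int) ^ n), List.map_map]
    simp only [sub_zero, hpow, Int.toNat_natCast]
    apply List.map_congr_left
    intro k hk
    simp [hn]
  · intro ans i hi
    obtain ⟨hi0, hi1⟩ := PySem.List.mem_pyRange_one.mp hi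
    have hk : i.toNat < 2 ^ n := by rw [hpow] at hi1; omega
    have hi' : i = ((i.toNat : Nat) : Int) := by omega
    beta_reduce
    rw [hi']
    -- bin(i)[2:] = binD i.toNat
    have hbn : PySem.List.slice (PySem.Int.toBinChars0b ((i.toNat : Nat) : Int)) (some 2) none
        = binD i.toNat := by
      rw [PySem.Int.toBinChars0b, if_neg (by omega)]
      simp [pysem, binD]
      congr 1
      omega
    rw [hbn]
    have hL : (binD i.toNat).length ≤ n := binD_len_le n i.toNat hn1 hk
    rw [if_pos (by omega : ((n:Int) - ((binD i.toNat).length : Int) ≥ 0))]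
    rw [PySem.List.pyRepeat_singleton,
      show ((n:Int) - ((binD i.toNat).length : Int)).toNat = n - (binD i.toNat).length by omega]
    rw [show List.replicate (n - (binD i.toNat).length) '0' ++ binD i.toNat = padM n i.toNat
      from rfl]
    simp only [Int.toNat_natCast,
      innerFold_eq_rowM cs (padM n i.toNat) cs.length rfl
        (by rw [padM_length n i.toNat hn1 hk, hn])]

-- ===== VERDICT (by name: the statement is the Claim_ definition above) =====
theorem getPermute_spec : Claim_unchanged_getPermute := by
  intro s _ hD
  apply getPermute_eq_alt
  intro h
  exact hD (String.toList_eq_nil_iff.mp h)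

theorem getPermute_changed : Claim_changed_getPermute := by
  unfold Claim_changed_getPermute; decide

theorem getPermute_tight : Claim_exact_getPermute := by
  intro s _ hD
  unfold D_getPermute at hD; subst hD
  decide
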